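-- pv_equiv track=rewrite | github.com/kanebenjamin/raid_boss | raid_boss/boss.py | get_attack_hint
-- ===== SOURCE A (Python) =====
-- def get_attack_hint(num_list):
--     result = []
--     RECOIL_TEXT = (
--         "The Horror recoils as it prepares to unleash a massive tidal wave. "
--     )
--     CHANNEL_TEXT = "The Horror is channeling dark energies. "
--     ATTACK_TEXT = "The Horror is summoning beasts from the depths. "
--     CHANNEL_LIST = [1, 2, 3, 7, 8, 9]
--     ATTACK_LIST = [4, 5, 6]
--     RECOIL_LIST = [0, 10]
--     for num in num_list:
--         if num in CHANNEL_LIST: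
--             if CHANNEL_TEXT not in result:
--                 result.append(CHANNEL_TEXT)
--         if num in ATTACK_LIST:
--             if ATTACK_TEXT not in result:
--                 result.append(ATTACK_TEXT)
--         if num in RECOIL_LIST:
--             if RECOIL_TEXT not in result:
--                 result.append(RECOIL_TEXT)
--     return " ".join(result) + "\n"
-- ===== SOURCE B (Python) =====
-- def get_attack_hint(num_list):
--     RECOIL_TEXT = (
--         "The Horror recoils as it prepares to unleash a massive tidal wave. "
--     )
--     CHANNEL_TEXT = "The Horror is channeling dark energies. "
--     ATTACK_TEXT = "The Horror is summoning beasts from the depths. "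
--     CATEGORIES = [
--         (CHANNEL_TEXT, (1, 2, 3, 7, 8, 9)),
--         (ATTACK_TEXT, (4, 5, 6)),
--         (RECOIL_TEXT, (0, 10)),
--     ]
--     firsts = []
--     for text, members in CATEGORIES:
--         idx = next((i for i, num in enumerate(num_list) if num in members), None)
--         if idx is not None:
--             firsts.append((idx, text))
--     firsts.sort(key=lambda pair: pair[0])
--     return " ".join(text for _, text in firsts) + "\n"
-- ===== Notes on version B (the rewrite author's own statement) =====
-- stated objective: alternative
-- what changed: B inverts the loop structure: instead of A's single pass over num_list with an append-if-absent result accumulator, B loops over the three categories, finds each category's first occurrence index in num_list with a next(...)/enumerate scan, then sorts the (index, text) pairs and joins the texts.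
import Mathlib
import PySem

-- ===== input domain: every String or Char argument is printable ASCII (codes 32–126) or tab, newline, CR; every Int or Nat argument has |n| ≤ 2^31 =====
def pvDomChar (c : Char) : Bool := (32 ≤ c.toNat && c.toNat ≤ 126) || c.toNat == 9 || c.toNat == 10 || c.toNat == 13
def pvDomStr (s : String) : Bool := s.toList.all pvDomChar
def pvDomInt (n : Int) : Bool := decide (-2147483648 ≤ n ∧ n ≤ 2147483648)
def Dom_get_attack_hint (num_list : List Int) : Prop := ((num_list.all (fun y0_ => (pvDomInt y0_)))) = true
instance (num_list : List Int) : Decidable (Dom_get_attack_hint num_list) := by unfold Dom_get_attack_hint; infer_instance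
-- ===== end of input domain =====

-- B inverts the loop structure: it scans per category for the first occurrence index,
-- then sorts the (index, text) pairs and joins — an alternative decomposition of A's
-- single accumulator pass; same cost.

def pvRecoilText : String := "The Horror recoils as it prepares to unleash a massive tidal wave. "
def pvChannelText : String := "The Horror is channeling dark energies. "
def pvAttackText : String := "The Horror is summoning beasts from the depths. "

-- ===== PORT A =====
-- loop body of A's for-loop (three guarded append-if-absent checks, in source order)
def pvStepA (result : List String) (num : Int) : List String :=
  let result := if ([1, 2, 3, 7, 8, 9] : List Int).contains num then
      (if result.contains pvChannelText then result else result ++ [pvChannelText]) else result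
  let result := if ([4, 5, 6] : List Int).contains num then
      (if result.contains pvAttackText then result else result ++ [pvAttackText]) else result
  if ([0, 10] : List Int).contains num then
      (if result.contains pvRecoilText then result else result ++ [pvRecoilText]) else result

def get_attack_hint (num_list : List Int) : String :=
  let result := num_list.foldl pvStepA []
  PySem.Str.join " " result ++ "\n"

-- ===== PORT B =====
-- next((i for i, num in enumerate(num_list) if num in members), None):
-- scan with running index i, return the first index whose element satisfies p
def pvFirst? (p : Int → Bool) : List Int → Int → Option Int
  | [], _ => none
  | x :: xs, i => if p x then some i else pvFirst? p xs (i + 1)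

-- loop body of B's for-loop over CATEGORIES
def pvStepB (acc : List (Int × String)) (c : String × List Int) (l : List Int) :
    List (Int × String) :=
  match pvFirst? (fun num => c.2.contains num) l 0 with
  | some i => acc ++ [(i, c.1)]
  | none => acc

def get_attack_hint_alt (num_list : List Int) : String :=
  let categories : List (String × List Int) :=
    [(pvChannelText, [1, 2, 3, 7, 8, 9]), (pvAttackText, [4, 5, 6]), (pvRecoilText, [0, 10])]
  let firsts := categories.foldl (fun acc c => pvStepB acc c num_list) []
  let firsts := PySem.List.sorted firsts (fun pair => pair.1) false
  PySem.Str.join " " (firsts.map (fun pair => pair.2)) ++ "\n"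

-- ===== PRECONDITION & SPEC =====
def Spec_get_attack_hint (num_list : List Int) (out : String) : Prop := out = get_attack_hint_alt num_list
instance (num_list : List Int) (out : String) : Decidable (Spec_get_attack_hint num_list out) := by unfold Spec_get_attack_hint; infer_instance

-- ===== CLAIM =====
def Claim_equal_get_attack_hint : Prop := ∀ (num_list : List Int), Dom_get_attack_hint num_list → Spec_get_attack_hint num_list (get_attack_hint num_list)

-- ===== LEMMAS AND PROOFS =====

-- the category piece contributed by one category to B's firsts list
def pvPiece (t : String) (p : Int → Bool) (l : List Int) : List (Int × String) :=
  match pvFirst? p l 0 with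
  | some i => [(i, t)]
  | none => []

def pvChB (n : Int) : Bool := ([1, 2, 3, 7, 8, 9] : List Int).contains n
def pvAtB (n : Int) : Bool := ([4, 5, 6] : List Int).contains n
def pvRcB (n : Int) : Bool := ([0, 10] : List Int).contains n

def pvF (l : List Int) : List (Int × String) :=
  pvPiece pvChannelText pvChB l ++ pvPiece pvAttackText pvAtB l ++ pvPiece pvRecoilText pvRcB l

lemma pvF_eq (l : List Int) :
    ([(pvChannelText, ([1, 2, 3, 7, 8, 9] : List Int)), (pvAttackText, [4, 5, 6]),
      (pvRecoilText, [0, 10])].foldl (fun acc c => pvStepB acc c l) []) = pvF l := by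
  simp only [List.foldl_cons, List.foldl_nil]
  unfold pvStepB pvF pvPiece
  have e1 : (fun num => ([1, 2, 3, 7, 8, 9] : List Int).contains num) = pvChB := rfl
  have e2 : (fun num => ([4, 5, 6] : List Int).contains num) = pvAtB := rfl
  have e3 : (fun num => ([0, 10] : List Int).contains num) = pvRcB := rfl
  simp only [e1, e2, e3]
  cases pvFirst? pvChB l 0 <;> cases pvFirst? pvAtB l 0 <;> cases pvFirst? pvRcB l 0 <;> simp

lemma pvFirst?_append (p : Int → Bool) (l : List Int) (x : Int) : ∀ i : Int,
    pvFirst? p (l ++ [x]) i =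
      match pvFirst? p l i with
      | some j => some j
      | none => if p x then some (i + l.length) else none := by
  induction l with
  | nil => intro i; simp [pvFirst?]
  | cons y ys ih =>
    intro i
    simp only [List.cons_append, pvFirst?]
    by_cases h : p y = true
    · simp [h]
    · simp only [eq_false_of_ne_true h, Bool.false_eq_true, if_false, ih (i + 1)]
      cases pvFirst? p ys (i + 1) with
      | some j => rfl
      | none =>
        simp only [List.length_cons]
        split_ifs with hx
        · congr 1; push_cast; ring
        · rfl

lemma pvFirst?_some (p : Int → Bool) (l : List Int) : ∀ (i j : Int),
    pvFirst? p l i = some j →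
      ∃ (k : Nat) (hk : k < l.length), j = i + k ∧ p l[k] = true := by
  induction l with
  | nil => intro i j h; simp [pvFirst?] at h
  | cons y ys ih =>
    intro i j h
    simp only [pvFirst?] at h
    by_cases hp : p y = true
    · simp [hp] at h
      exact ⟨0, by simp, by simp [← h], by simpa using hp⟩
    · simp [eq_false_of_ne_true hp] at h
      obtain ⟨k, hk, hj, hpk⟩ := ih (i + 1) j h
      exact ⟨k + 1, by simpa using hk, by push_cast at hj ⊢; omega, by simpa using hpk⟩

lemma pvFirst?_ne (p q : Int → Bool) (l : List Int) (i j : Int)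
    (hd : ∀ n, p n = true → q n = false)
    (hp : pvFirst? p l 0 = some i) (hq : pvFirst? q l 0 = some j) : i ≠ j := by
  obtain ⟨k1, hk1, hi, hp1⟩ := pvFirst?_some p l 0 i hp
  obtain ⟨k2, hk2, hj, hq2⟩ := pvFirst?_some q l 0 j hq
  intro h
  have : k1 = k2 := by omega
  subst this
  rw [hd _ hp1] at hq2
  exact absurd hq2 (by simp)

lemma pvFirst?_lt (p : Int → Bool) (l : List Int) (j : Int)
    (h : pvFirst? p l 0 = some j) : j < (l.length : Int) := by
  obtain ⟨k, hk, hj, _⟩ := pvFirst?_some p l 0 j h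
  omega

-- any insertion of a strictly maximal element sorts to the end
lemma pv_sorted_snoc (xs ys : List (Int × String)) (m : Int × String)
    (hlt : ∀ q ∈ xs ++ ys, q.1 < m.1)
    (hne : (xs ++ ys).Pairwise (fun a b => a.1 ≠ b.1)) :
    PySem.List.sorted (xs ++ [m] ++ ys) (fun pair => pair.1) false
      = PySem.List.sorted (xs ++ ys) (fun pair => pair.1) false ++ [m] := by
  apply PySem.List.sorted_eq_of_perm_of_pairwise_lt
  · have h1 : (PySem.List.sorted (xs ++ ys) (fun pair => pair.1) false).Perm (xs ++ ys) :=
      PySem.List.sorted_perm _ _ _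
    have h2 : ((xs ++ ys) ++ [m]).Perm (xs ++ [m] ++ ys) := by
      rw [List.append_assoc, List.append_assoc]
      exact List.Perm.append_left xs List.perm_append_comm
    exact (h1.append_right [m]).trans h2
  · rw [List.pairwise_append]
    refine ⟨?_, by simp, ?_⟩
    · have h1 := PySem.List.sorted_pairwise (xs ++ ys) (fun pair => pair.1)
      have h2 : (PySem.List.sorted (xs ++ ys) (fun pair => pair.1) false).Pairwise
          (fun a b => a.1 ≠ b.1) :=
        ((PySem.List.sorted_perm _ _ _).pairwise_iff (fun h => (h ·.symm))).mpr hne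
      exact (h1.and h2).imp (fun ⟨hle, hne'⟩ => lt_of_le_of_ne hle hne')
    · intro a ha b hb
      simp only [List.mem_singleton] at hb
      subst hb
      exact hlt a ((PySem.List.mem_sorted _ _ _ _).mp ha)

-- disjointness of the three categories
lemma pv_ch_at (n : Int) (h : pvChB n = true) : pvAtB n = false := by
  simp [pvChB, List.contains_eq_mem] at h
  rcases h with rfl|rfl|rfl|rfl|rfl|rfl <;> decide
lemma pv_ch_rc (n : Int) (h : pvChB n = true) : pvRcB n = false := by
  simp [pvChB, List.contains_eq_mem] at h
  rcases h with rfl|rfl|rfl|rfl|rfl|rfl <;> decide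
lemma pv_at_rc (n : Int) (h : pvAtB n = true) : pvRcB n = false := by
  simp [pvAtB, List.contains_eq_mem] at h
  rcases h with rfl|rfl|rfl <;> decide

lemma pv_piece_lt (t : String) (p : Int → Bool) (l : List Int) (q : Int × String)
    (hq : q ∈ pvPiece t p l) : q.1 < (l.length : Int) := by
  unfold pvPiece at hq
  cases h : pvFirst? p l 0 with
  | none => simp [h] at hq
  | some i =>
    simp [h] at hq
    subst hq
    exact pvFirst?_lt p l i h

lemma pv_piece_snd (t : String) (p : Int → Bool) (l : List Int) (q : Int × String)
    (hq : q ∈ pvPiece t p l) : q.2 = t := by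
  unfold pvPiece at hq
  cases h : pvFirst? p l 0 with
  | none => simp [h] at hq
  | some i => simp [h] at hq; subst hq; rfl

lemma pvF_lt (l : List Int) (q : Int × String) (hq : q ∈ pvF l) : q.1 < (l.length : Int) := by
  unfold pvF at hq
  simp only [List.mem_append] at hq
  rcases hq with (h | h) | h <;> exact pv_piece_lt _ _ _ _ h

lemma pv_pieces_ne (t1 t2 : String) (p1 p2 : Int → Bool) (l : List Int)
    (hd : ∀ n, p1 n = true → p2 n = false) :
    ∀ a ∈ pvPiece t1 p1 l, ∀ b ∈ pvPiece t2 p2 l, a.1 ≠ b.1 := by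
  intro a ha b hb
  unfold pvPiece at ha hb
  cases h1 : pvFirst? p1 l 0 with
  | none => simp [h1] at ha
  | some i =>
    cases h2 : pvFirst? p2 l 0 with
    | none => simp [h2] at hb
    | some j =>
      simp [h1] at ha; simp [h2] at hb
      subst ha; subst hb
      exact pvFirst?_ne p1 p2 l i j hd h1 h2

lemma pv_piece_pairwise (t : String) (p : Int → Bool) (l : List Int) :
    (pvPiece t p l).Pairwise (fun a b => a.1 ≠ b.1) := by
  unfold pvPiece; cases pvFirst? p l 0 <;> simp

lemma pvF_ne (l : List Int) : (pvF l).Pairwise (fun a b : Int × String => a.1 ≠ b.1) := by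
  unfold pvF
  refine List.pairwise_append.mpr ⟨?_, pv_piece_pairwise _ _ _, ?_⟩
  · exact List.pairwise_append.mpr ⟨pv_piece_pairwise _ _ _, pv_piece_pairwise _ _ _,
      pv_pieces_ne _ _ _ _ l pv_ch_at⟩
  · intro a ha b hb
    rcases List.mem_append.mp ha with h | h
    · exact pv_pieces_ne _ _ _ _ l pv_ch_rc a h b hb
    · exact pv_pieces_ne _ _ _ _ l pv_at_rc a h b hb

-- membership of a text in B's joined list ↔ its category's first index exists
lemma pv_mem_iff (l : List Int) (t : String) :
    t ∈ (PySem.List.sorted (pvF l) (fun pair => pair.1) false).map (fun pair => pair.2)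
      ↔ ∃ q ∈ pvF l, q.2 = t := by
  simp only [List.mem_map]
  constructor
  · rintro ⟨q, hq, rfl⟩
    exact ⟨q, (PySem.List.mem_sorted _ _ _ _).mp hq, rfl⟩
  · rintro ⟨q, hq, rfl⟩
    exact ⟨q, (PySem.List.mem_sorted _ _ _ _).mpr hq, rfl⟩

lemma pv_texts_ne_1 : pvChannelText ≠ pvAttackText := by decide
lemma pv_texts_ne_2 : pvChannelText ≠ pvRecoilText := by decide
lemma pv_texts_ne_3 : pvAttackText ≠ pvRecoilText := by decide

-- unchanged category piece when the appended element is not a member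
lemma pv_piece_append_of_false (t : String) (p : Int → Bool) (l : List Int) (x : Int)
    (h : p x = false) : pvPiece t p (l ++ [x]) = pvPiece t p l := by
  unfold pvPiece
  rw [pvFirst?_append]
  cases pvFirst? p l 0 <;> simp [h]

lemma pv_piece_append_some (t : String) (p : Int → Bool) (l : List Int) (x : Int) (j : Int)
    (h : pvFirst? p l 0 = some j) : pvPiece t p (l ++ [x]) = pvPiece t p l := by
  unfold pvPiece
  rw [pvFirst?_append, h]

lemma pv_piece_append_new (t : String) (p : Int → Bool) (l : List Int) (x : Int)
    (h : pvFirst? p l 0 = none) (hx : p x = true) :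
    pvPiece t p (l ++ [x]) = [((l.length : Int), t)] := by
  unfold pvPiece
  rw [pvFirst?_append, h]
  simp [hx]

-- pvStepA specialised to each category of the scanned element
lemma pvStepA_ch (r : List String) (x : Int) (h : pvChB x = true) :
    pvStepA r x = if r.contains pvChannelText then r else r ++ [pvChannelText] := by
  have hat := pv_ch_at x h
  have hrc := pv_ch_rc x h
  unfold pvChB at h; unfold pvAtB at hat; unfold pvRcB at hrc
  simp only [pvStepA, h, hat, hrc, if_true, Bool.false_eq_true, if_false]

lemma pvStepA_at (r : List String) (x : Int) (h : pvAtB x = true) (hch : pvChB x = false) :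
    pvStepA r x = if r.contains pvAttackText then r else r ++ [pvAttackText] := by
  have hrc := pv_at_rc x h
  unfold pvChB at hch; unfold pvAtB at h; unfold pvRcB at hrc
  simp only [pvStepA, h, hch, hrc, if_true, Bool.false_eq_true, if_false]

lemma pvStepA_rc (r : List String) (x : Int) (h : pvRcB x = true) (hch : pvChB x = false)
    (hat : pvAtB x = false) :
    pvStepA r x = if r.contains pvRecoilText then r else r ++ [pvRecoilText] := by
  unfold pvChB at hch; unfold pvAtB at hat; unfold pvRcB at h
  simp only [pvStepA, h, hch, hat, if_true, Bool.false_eq_true, if_false]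

lemma pvStepA_none (r : List String) (x : Int) (hch : pvChB x = false) (hat : pvAtB x = false)
    (hrc : pvRcB x = false) : pvStepA r x = r := by
  unfold pvChB at hch; unfold pvAtB at hat; unfold pvRcB at hrc
  simp only [pvStepA, hch, hat, hrc, Bool.false_eq_true, if_false]

-- the central invariant: A's accumulator equals B's sorted-by-first-index text list
lemma pv_main (l : List Int) :
    l.foldl pvStepA []
      = (PySem.List.sorted (pvF l) (fun pair => pair.1) false).map (fun pair => pair.2) := by
  induction l using List.reverseRecOn with
  | nil => rfl
  | append_singleton l x ih =>
    rw [List.foldl_append, List.foldl_cons, List.foldl_nil, ih]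
    by_cases hch : pvChB x = true
    · rw [pvStepA_ch _ _ hch]
      have hat := pv_ch_at x hch
      have hrc := pv_ch_rc x hch
      cases h1 : pvFirst? pvChB l 0 with
      | some j =>
        have hF : pvF (l ++ [x]) = pvF l := by
          unfold pvF
          rw [pv_piece_append_some _ _ _ _ _ h1, pv_piece_append_of_false _ _ _ _ hat,
            pv_piece_append_of_false _ _ _ _ hrc]
        have hm : pvChannelText ∈
            (PySem.List.sorted (pvF l) (fun pair => pair.1) false).map (fun pair => pair.2) := by
          rw [pv_mem_iff]
          exact ⟨(j, pvChannelText), by unfold pvF pvPiece; rw [h1]; simp, rfl⟩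
        rw [hF, if_pos (by simp only [List.contains_eq_mem]; simpa using hm)]
      | none =>
        have hF : pvF (l ++ [x]) =
            [] ++ [((l.length : Int), pvChannelText)] ++
              (pvPiece pvAttackText pvAtB l ++ pvPiece pvRecoilText pvRcB l) := by
          unfold pvF
          rw [pv_piece_append_new _ _ _ _ h1 hch, pv_piece_append_of_false _ _ _ _ hat,
            pv_piece_append_of_false _ _ _ _ hrc]
          simp
        have hFl : pvF l = pvPiece pvAttackText pvAtB l ++ pvPiece pvRecoilText pvRcB l := by
          unfold pvF
          conv_lhs => rw [show pvPiece pvChannelText pvChB l = [] by unfold pvPiece; rw [h1]]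
          simp
        have hnm : pvChannelText ∉
            (PySem.List.sorted (pvF l) (fun pair => pair.1) false).map (fun pair => pair.2) := by
          rw [pv_mem_iff, hFl]
          rintro ⟨q, hq, hqt⟩
          rcases List.mem_append.mp hq with h | h
          · exact pv_texts_ne_1 ((pv_piece_snd _ _ _ _ h ▸ hqt).symm)
          · exact pv_texts_ne_2 ((pv_piece_snd _ _ _ _ h ▸ hqt).symm)
        have hsnoc := pv_sorted_snoc []
          (pvPiece pvAttackText pvAtB l ++ pvPiece pvRecoilText pvRcB l)
          ((l.length : Int), pvChannelText)
          (by intro q hq; exact pvF_lt l q (by rw [hFl]; exact hq))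
          (hFl ▸ pvF_ne l)
        rw [if_neg (by simp only [List.contains_eq_mem]; simpa using hnm), hF, hsnoc, ← hFl]
        simp
    · have hch' := eq_false_of_ne_true hch
      by_cases hat : pvAtB x = true
      · rw [pvStepA_at _ _ hat hch']
        have hrc := pv_at_rc x hat
        cases h1 : pvFirst? pvAtB l 0 with
        | some j =>
          have hF : pvF (l ++ [x]) = pvF l := by
            unfold pvF
            rw [pv_piece_append_some _ _ _ _ _ h1, pv_piece_append_of_false _ _ _ _ hch',
              pv_piece_append_of_false _ _ _ _ hrc]
          have hm : pvAttackText ∈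
              (PySem.List.sorted (pvF l) (fun pair => pair.1) false).map (fun pair => pair.2) := by
            rw [pv_mem_iff]
            refine ⟨(j, pvAttackText), ?_, rfl⟩
            unfold pvF
            refine List.mem_append.mpr (Or.inl (List.mem_append.mpr (Or.inr ?_)))
            unfold pvPiece; rw [h1]; simp
          rw [hF, if_pos (by simp only [List.contains_eq_mem]; simpa using hm)]
        | none =>
          have hF : pvF (l ++ [x]) =
              pvPiece pvChannelText pvChB l ++ [((l.length : Int), pvAttackText)] ++
                pvPiece pvRecoilText pvRcB l := by
            unfold pvF
            rw [pv_piece_append_new _ _ _ _ h1 hat, pv_piece_append_of_false _ _ _ _ hch',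
              pv_piece_append_of_false _ _ _ _ hrc]
          have hFl : pvF l = pvPiece pvChannelText pvChB l ++ pvPiece pvRecoilText pvRcB l := by
            unfold pvF
            conv_lhs => rw [show pvPiece pvAttackText pvAtB l = [] by unfold pvPiece; rw [h1]]
            simp
          have hnm : pvAttackText ∉
              (PySem.List.sorted (pvF l) (fun pair => pair.1) false).map (fun pair => pair.2) := by
            rw [pv_mem_iff, hFl]
            rintro ⟨q, hq, hqt⟩
            rcases List.mem_append.mp hq with h | h
            · exact pv_texts_ne_1 (pv_piece_snd _ _ _ _ h ▸ hqt)
            · exact pv_texts_ne_3 ((pv_piece_snd _ _ _ _ h ▸ hqt).symm)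
          have hsnoc := pv_sorted_snoc (pvPiece pvChannelText pvChB l)
            (pvPiece pvRecoilText pvRcB l) ((l.length : Int), pvAttackText)
            (by intro q hq; exact pvF_lt l q (by rw [hFl]; exact hq))
            (hFl ▸ pvF_ne l)
          rw [if_neg (by simp only [List.contains_eq_mem]; simpa using hnm), hF, hsnoc, ← hFl]
          simp
      · have hat' := eq_false_of_ne_true hat
        by_cases hrc : pvRcB x = true
        · rw [pvStepA_rc _ _ hrc hch' hat']
          cases h1 : pvFirst? pvRcB l 0 with
          | some j =>
            have hF : pvF (l ++ [x]) = pvF l := by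
              unfold pvF
              rw [pv_piece_append_some _ _ _ _ _ h1, pv_piece_append_of_false _ _ _ _ hch',
                pv_piece_append_of_false _ _ _ _ hat']
            have hm : pvRecoilText ∈
                (PySem.List.sorted (pvF l) (fun pair => pair.1) false).map
                  (fun pair => pair.2) := by
              rw [pv_mem_iff]
              refine ⟨(j, pvRecoilText), ?_, rfl⟩
              unfold pvF
              refine List.mem_append.mpr (Or.inr ?_)
              unfold pvPiece; rw [h1]; simp
            rw [hF, if_pos (by simp only [List.contains_eq_mem]; simpa using hm)]
          | none =>
            have hF : pvF (l ++ [x]) =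
                (pvPiece pvChannelText pvChB l ++ pvPiece pvAttackText pvAtB l) ++
                  [((l.length : Int), pvRecoilText)] ++ ([] : List (Int × String)) := by
              unfold pvF
              rw [pv_piece_append_new _ _ _ _ h1 hrc, pv_piece_append_of_false _ _ _ _ hch',
                pv_piece_append_of_false _ _ _ _ hat']
              simp
            have hFl : pvF l =
                (pvPiece pvChannelText pvChB l ++ pvPiece pvAttackText pvAtB l) ++
                  ([] : List (Int × String)) := by
              unfold pvF
              conv_lhs => rw [show pvPiece pvRecoilText pvRcB l = [] by unfold pvPiece; rw [h1]]
            have hnm : pvRecoilText ∉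
                (PySem.List.sorted (pvF l) (fun pair => pair.1) false).map
                  (fun pair => pair.2) := by
              rw [pv_mem_iff, hFl]
              rintro ⟨q, hq, hqt⟩
              simp only [List.append_nil] at hq
              rcases List.mem_append.mp hq with h | h
              · exact pv_texts_ne_2 (pv_piece_snd _ _ _ _ h ▸ hqt)
              · exact pv_texts_ne_3 (pv_piece_snd _ _ _ _ h ▸ hqt)
            have hsnoc := pv_sorted_snoc
              (pvPiece pvChannelText pvChB l ++ pvPiece pvAttackText pvAtB l)
              ([] : List (Int × String)) ((l.length : Int), pvRecoilText)
              (by intro q hq; exact pvF_lt l q (by rw [hFl]; exact hq))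
              (hFl ▸ pvF_ne l)
            rw [if_neg (by simp only [List.contains_eq_mem]; simpa using hnm), hF, hsnoc, ← hFl]
            simp
        · have hF : pvF (l ++ [x]) = pvF l := by
            unfold pvF
            rw [pv_piece_append_of_false _ _ _ _ hch', pv_piece_append_of_false _ _ _ _ hat',
              pv_piece_append_of_false _ _ _ _ (eq_false_of_ne_true hrc)]
          rw [pvStepA_none _ _ hch' hat' (eq_false_of_ne_true hrc), hF]

-- ===== VERDICT =====
theorem get_attack_hint_spec : Claim_equal_get_attack_hint := by
  intro num_list _
  show PySem.Str.join " " (num_list.foldl pvStepA []) ++ "\n" = _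
  rw [pv_main]
  show _ = PySem.Str.join " "
      ((PySem.List.sorted
        ([(pvChannelText, ([1, 2, 3, 7, 8, 9] : List Int)), (pvAttackText, [4, 5, 6]),
          (pvRecoilText, [0, 10])].foldl (fun acc c => pvStepB acc c num_list) [])
        (fun pair => pair.1) false).map (fun pair => pair.2)) ++ "\n"
  rw [pvF_eq]
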